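-- pv_equiv track=rewrite | github.com/Iansdfg/Leetcode2ndTime | 36. Valid Sudoku.py | isValidSqr
-- ===== SOURCE A (Python) =====
-- def isValidSqr(board):
--     for row in range(0,len(board),3):
--         for col in range(0,len(board),3):
--             sqr = []
--             for i in range(3):
--                 for j in range(3):
--                     ele = board[row+i][col+j]
--                     if ele!='.':
--                         sqr.append(ele)
--                     if len(sqr) != len(set(sqr)):
--                         return False
--     return True
-- ===== SOURCE B (Python) =====
-- def isValidSqr(board):
--     n = len(board)
--     boxes = {}
--     for r in range(n):
--         for c in range(n):
--             ele = board[r][c]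
--             if ele == '.':
--                 continue
--             key = (r // 3, c // 3)
--             seen = boxes.setdefault(key, set())
--             if ele in seen:
--                 return False
--             seen.add(ele)
--     return True
-- ===== Notes on version B (the rewrite author's own statement) =====
-- stated objective: alternative
-- what changed: Replaces the box-by-box quadruple loop that rebuilds a list and set(sqr) after every append with one flat row-major pass over the n x n cells, keeping one membership set per box in a dict keyed by (r//3, c//3); Pre_ excludes boards whose side is not a multiple of 3 or with rows shorter than the side, where A's rounded-up box ranges raise IndexError or return an accidental early False on cells past the square.
-- outside the precondition, e.g. on isValidSqr([['1', '1', 'x']]): A returns False, B returns True; on isValidSqr([['a', 'b', 'c'], ['a'], [''], ['']]): A returns False, B raises IndexError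
import Mathlib
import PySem

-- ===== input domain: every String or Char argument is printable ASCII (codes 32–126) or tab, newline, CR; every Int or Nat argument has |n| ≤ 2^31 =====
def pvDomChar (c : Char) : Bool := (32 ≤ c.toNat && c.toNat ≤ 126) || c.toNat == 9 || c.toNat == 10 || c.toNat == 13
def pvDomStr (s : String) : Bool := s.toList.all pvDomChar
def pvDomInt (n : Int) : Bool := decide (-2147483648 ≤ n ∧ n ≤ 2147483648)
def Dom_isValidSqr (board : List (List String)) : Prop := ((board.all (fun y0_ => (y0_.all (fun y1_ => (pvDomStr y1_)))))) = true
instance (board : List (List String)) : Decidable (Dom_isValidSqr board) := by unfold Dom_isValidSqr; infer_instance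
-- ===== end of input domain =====

-- B replaces A's box-by-box quadruple loop (which rebuilds set(sqr) after every append) with one
-- row-major pass over the n×n cells keeping a per-box membership set keyed by (r//3, c//3); objective: alternative.

-- ===== PORT A =====
-- board[r][c]: total stand-in with defaults; exact where both indices are in range (Pre_ guarantees this)
def pvCell (board : List (List String)) (r c : Int) : String :=
  PySem.List.pyGetD (PySem.List.pyGetD board r []) c ""

-- inner 'for j in range(3)' loop of A, carrying sqr; none = 'return False'
def aInner (board : List (List String)) (row col i : Int) : List Int → List String → Option (List String)
  | [], sqr => some sqr
  | j :: js, sqr =>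
    let ele := pvCell board (row + i) (col + j)
    let sqr' := if ele ≠ "." then sqr ++ [ele] else sqr
    if sqr'.length ≠ (PySem.Set.ofList sqr').length then none
    else aInner board row col i js sqr'

-- 'for i in range(3)' loop of A
def aMid (board : List (List String)) (row col : Int) : List Int → List String → Bool
  | [], _ => true
  | i :: is, sqr =>
    match aInner board row col i (PySem.List.pyRange 0 3 1) sqr with
    | none => false
    | some sqr' => aMid board row col is sqr'

-- 'for col in range(0, len(board), 3)' loop of A (sqr = [] restarts per box)
def aCols (board : List (List String)) (row : Int) : List Int → Bool
  | [] => true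
  | col :: cols =>
    if aMid board row col (PySem.List.pyRange 0 3 1) [] then aCols board row cols else false

-- 'for row in range(0, len(board), 3)' loop of A
def aRows (board : List (List String)) (n : Int) : List Int → Bool
  | [] => true
  | row :: rows =>
    if aCols board row (PySem.List.pyRange 0 n 3) then aRows board n rows else false

def isValidSqr (board : List (List String)) : Bool :=
  aRows board (board.length : Int) (PySem.List.pyRange 0 (board.length : Int) 3)

-- ===== PORT B =====
-- the flattened 'for r in range(n): for c in range(n)' cell sequence of B
def bCells (n : Int) : List (Int × Int) :=
  (PySem.List.pyRange 0 n 1).flatMap (fun r => (PySem.List.pyRange 0 n 1).map (fun c => (r, c)))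

-- B's single pass: boxes = dict of per-box sets; 'setdefault' + in-place 'seen.add(ele)' = insert key (seen.add ele)
def bGo (board : List (List String)) : List (Int × Int) → PySem.Dict (Int × Int) (PySem.Set String) → Bool
  | [], _ => true
  | rc :: rest, d =>
    let ele := pvCell board rc.1 rc.2
    if ele = "." then bGo board rest d
    else
      let key := (PySem.Int.floordiv rc.1 3, PySem.Int.floordiv rc.2 3)
      let seen := d.getD key PySem.Set.empty
      if PySem.Set.contains seen ele then false
      else bGo board rest (d.insert key (PySem.Set.add seen ele))

def isValidSqr_alt (board : List (List String)) : Bool :=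
  bGo board (bCells (board.length : Int)) PySem.Dict.empty

-- ===== PRECONDITION & SPEC =====
-- Pre_ = the natural 'square board with side a multiple of 3' domain, plus boards whose top-left
-- 3×3 box already contains a duplicate that both scans provably reach (both return False); on the
-- remaining boards the Python A raises IndexError (its box ranges are rounded up past the board, so
-- board[row+i] or row[col+j] runs off the end) unless its box-by-box scan happens to hit a duplicate
-- on a cell past the n×n square first, returning an accidental early False that a natural n×n scan
-- never sees (see claim cites).
def Pre_isValidSqr (board : List (List String)) : Prop :=
  ((3 : Int) ∣ (board.length : Int) ∧ ∀ row ∈ board, board.length ≤ row.length) ∨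
  (2 ≤ board.length ∧ 2 ≤ (board.getD 0 []).length ∧
    pvCell board 0 0 = pvCell board 0 1 ∧ pvCell board 0 0 ≠ ".") ∨
  (3 ≤ board.length ∧ 3 ≤ (board.getD 0 []).length ∧
    ((pvCell board 0 0 = pvCell board 0 2 ∧ pvCell board 0 0 ≠ ".") ∨
     (pvCell board 0 1 = pvCell board 0 2 ∧ pvCell board 0 1 ≠ "."))) ∨
  (3 ≤ board.length ∧ board.length ≤ (board.getD 0 []).length ∧
    board.length ≤ (board.getD 1 []).length ∧ 3 ≤ (board.getD 2 []).length ∧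
    ¬ (([pvCell board 0 0, pvCell board 0 1, pvCell board 0 2,
         pvCell board 1 0, pvCell board 1 1, pvCell board 1 2,
         pvCell board 2 0, pvCell board 2 1, pvCell board 2 2].filter
           (fun e => e ≠ ".")).Nodup))
instance (board : List (List String)) : Decidable (Pre_isValidSqr board) := by
  unfold Pre_isValidSqr; infer_instance

def pvWitness_isValidSqr : List (List String) :=
  [["5", ".", "3"], [".", "7", "."], [".", ".", "9"]]

def Spec_isValidSqr (board : List (List String)) (out : Bool) : Prop := out = isValidSqr_alt board
instance (board : List (List String)) (out : Bool) : Decidable (Spec_isValidSqr board out) := by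
  unfold Spec_isValidSqr; infer_instance

-- ===== CLAIM (what is proved, stated in full; the proofs are below) =====
def Claim_equal_isValidSqr : Prop := ∀ (board : List (List String)), Dom_isValidSqr board → Pre_isValidSqr board → Spec_isValidSqr board (isValidSqr board)

-- ===== LEMMAS AND PROOFS =====

-- non-'.' values A collects for box (row, col): inner j-loop resp. i-loop prefix, and the whole box
def ndI (board : List (List String)) (row col i : Int) (js : List Int) : List String :=
  (js.map (fun j => pvCell board (row + i) (col + j))).filter (fun e => e ≠ ".")

def ndM (board : List (List String)) (row col : Int) (is : List Int) : List String :=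
  (is.flatMap (fun i => (PySem.List.pyRange 0 3 1).map (fun j => pvCell board (row + i) (col + j)))).filter
    (fun e => e ≠ ".")

def boxVals (board : List (List String)) (row col : Int) : List String :=
  ndM board row col (PySem.List.pyRange 0 3 1)

-- B's tagged stream: (box key, value) for each non-'.' cell
def tagF (board : List (List String)) (rc : Int × Int) : Option ((Int × Int) × String) :=
  if pvCell board rc.1 rc.2 = "." then none
  else some ((PySem.Int.floordiv rc.1 3, PySem.Int.floordiv rc.2 3), pvCell board rc.1 rc.2)

-- A's traversal of the same cells, box by box
def bxCells (n : Int) : List (Int × Int) :=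
  (PySem.List.pyRange 0 n 3).flatMap (fun row =>
    (PySem.List.pyRange 0 n 3).flatMap (fun col =>
      (PySem.List.pyRange 0 3 1).flatMap (fun i =>
        (PySem.List.pyRange 0 3 1).map (fun j => (row + i, col + j)))))

theorem ofList_append_singleton {l : List String} {x : String} (h : l.Nodup) :
    PySem.Set.ofList (l ++ [x]) = if x ∈ l then l else l ++ [x] := by
  rw [PySem.Set.ofList_eq_foldl, List.foldl_append]
  rw [← PySem.Set.ofList_eq_foldl, PySem.Set.ofList_eq_self_of_nodup l h]
  show PySem.Set.add l x = _
  unfold PySem.Set.add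
  by_cases hm : x ∈ l
  · rw [if_pos ((PySem.Set.contains_iff l x).mpr hm), if_pos hm]
  · rw [if_neg (by simpa [PySem.Set.contains_iff] using hm), if_neg hm]

theorem lenCheck_pass {l : List String} (h : l.Nodup) :
    (PySem.Set.ofList l).length = l.length := by
  rw [PySem.Set.ofList_eq_self_of_nodup l h]

theorem aInner_spec (board : List (List String)) (row col i : Int) (js : List Int) :
    ∀ sqr : List String, sqr.Nodup →
      aInner board row col i js sqr =
        if (sqr ++ ndI board row col i js).Nodup then some (sqr ++ ndI board row col i js)
        else none := by
  induction js with
  | nil => intro sqr hs; simp [aInner, ndI, hs]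
  | cons j js ih =>
    intro sqr hs
    rw [aInner]
    by_cases he : pvCell board (row + i) (col + j) = "."
    · have hnd : ndI board row col i (j :: js) = ndI board row col i js := by
        simp [ndI, he]
      rw [if_neg (not_not_intro he)]
      rw [if_neg (by rw [lenCheck_pass hs]; exact not_not_intro rfl)]
      rw [ih sqr hs, hnd]
    · have hnd : ndI board row col i (j :: js) =
          pvCell board (row + i) (col + j) :: ndI board row col i js := by
        simp [ndI, he]
      rw [if_pos he]
      by_cases hm : pvCell board (row + i) (col + j) ∈ sqr
      · rw [if_pos (by rw [ofList_append_singleton hs, if_pos hm]; simp)]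
        rw [if_neg (by
          rw [hnd]
          simp only [List.nodup_append]
          rintro ⟨-, -, hdisj⟩
          exact hdisj _ hm _ (List.mem_cons_self) rfl)]
      · have hs' : (sqr ++ [pvCell board (row + i) (col + j)]).Nodup := by
          simp only [List.nodup_append, List.nodup_cons, List.not_mem_nil, not_false_iff,
            List.nodup_nil, and_true, List.mem_singleton]
          exact ⟨hs, by simp, fun a ha b hb => by subst hb; exact fun h => hm (h ▸ ha)⟩
        rw [if_neg (by rw [ofList_append_singleton hs, if_neg hm]; exact not_not_intro rfl)]
        rw [ih _ hs', hnd]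
        simp [List.append_assoc]

theorem aMid_spec (board : List (List String)) (row col : Int) (is : List Int) :
    ∀ sqr : List String, sqr.Nodup →
      aMid board row col is sqr = decide ((sqr ++ ndM board row col is).Nodup) := by
  induction is with
  | nil => intro sqr hs; simp [aMid, ndM, hs]
  | cons i is ih =>
    intro sqr hs
    rw [aMid, aInner_spec board row col i _ sqr hs]
    have hsplit : ndM board row col (i :: is) =
        ndI board row col i (PySem.List.pyRange 0 3 1) ++ ndM board row col is := by
      simp [ndM, ndI, List.flatMap_cons, List.filter_append]
    by_cases h : (sqr ++ ndI board row col i (PySem.List.pyRange 0 3 1)).Nodup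
    · rw [if_pos h]
      dsimp only
      rw [ih _ h, hsplit]
      simp [List.append_assoc]
    · rw [if_neg h, hsplit]
      dsimp only
      have : ¬ (sqr ++ (ndI board row col i (PySem.List.pyRange 0 3 1) ++ ndM board row col is)).Nodup := by
        intro hc
        exact h (by rw [← List.append_assoc] at hc; exact hc.of_append_left)
      simp [this]

theorem aCols_spec (board : List (List String)) (row : Int) (cols : List Int) :
    aCols board row cols = cols.all (fun col => decide ((boxVals board row col).Nodup)) := by
  induction cols with
  | nil => simp [aCols]
  | cons col cols ih =>
    rw [aCols, aMid_spec board row col _ [] List.nodup_nil]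
    by_cases h : (boxVals board row col).Nodup
    · rw [if_pos (by simpa [boxVals] using h), ih]
      simp [h]
    · rw [if_neg (by simpa [boxVals] using h)]
      simp [h]

theorem aRows_spec (board : List (List String)) (n : Int) (rows : List Int) :
    aRows board n rows =
      rows.all (fun row =>
        (PySem.List.pyRange 0 n 3).all (fun col => decide ((boxVals board row col).Nodup))) := by
  induction rows with
  | nil => simp [aRows]
  | cons row rows ih =>
    rw [aRows, aCols_spec]
    by_cases h : (PySem.List.pyRange 0 n 3).all (fun col => decide ((boxVals board row col).Nodup)) = true
    · rw [if_pos h, ih]; simp [h]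
    · rw [if_neg h]; simp [Bool.eq_false_iff.mpr h]

theorem bGo_spec (board : List (List String)) (cells : List (Int × Int)) :
    ∀ d : PySem.Dict (Int × Int) (PySem.Set String),
      (bGo board cells d = true ↔
        ((cells.filterMap (tagF board)).Nodup ∧
          ∀ p ∈ cells.filterMap (tagF board), p.2 ∉ d.getD p.1 PySem.Set.empty)) := by
  induction cells with
  | nil => intro d; simp [bGo]
  | cons rc rest ih =>
    intro d
    rw [bGo]
    by_cases he : pvCell board rc.1 rc.2 = "."
    · rw [if_pos he]
      rw [List.filterMap_cons_none (by simp [tagF, he])]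
      exact ih d
    · rw [if_neg he]
      rw [List.filterMap_cons_some (f := tagF board)
        (show tagF board rc =
            some ((PySem.Int.floordiv rc.1 3, PySem.Int.floordiv rc.2 3), pvCell board rc.1 rc.2) by
          simp [tagF, he])]
      set k : Int × Int := (PySem.Int.floordiv rc.1 3, PySem.Int.floordiv rc.2 3) with hk
      set e : String := pvCell board rc.1 rc.2 with hev
      set seen := d.getD k PySem.Set.empty with hseen
      by_cases hm : e ∈ seen
      · rw [if_pos ((PySem.Set.contains_iff _ _).mpr hm)]
        constructor
        · intro h; exact absurd h (by simp)
        · rintro ⟨-, hall⟩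
          exact absurd (hall (k, e) List.mem_cons_self) (by simpa using hm)
      · rw [if_neg (by simpa [PySem.Set.contains_iff] using hm)]
        rw [ih]
        constructor
        · rintro ⟨hnd, hall⟩
          refine ⟨List.nodup_cons.mpr ⟨?_, hnd⟩, ?_⟩
          · intro hmem
            have := hall (k, e) hmem
            rw [PySem.Dict.getD_insert] at this
            rw [if_pos rfl] at this
            exact this ((PySem.Set.mem_add seen e e).mpr (Or.inr rfl))
          · intro p hp
            rcases List.mem_cons.mp hp with rfl | hp'
            · simpa using hm
            · have := hall p hp'
              rw [PySem.Dict.getD_insert] at this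
              by_cases hpk : p.1 = k
              · rw [if_pos hpk] at this
                intro hc
                exact this ((PySem.Set.mem_add seen e p.2).mpr (Or.inl (by rwa [hpk] at hc)))
              · rwa [if_neg hpk] at this
        · rintro ⟨hnd, hall⟩
          refine ⟨(List.nodup_cons.mp hnd).2, ?_⟩
          intro p hp
          have hpd := hall p (List.mem_cons_of_mem _ hp)
          rw [PySem.Dict.getD_insert]
          by_cases hpk : p.1 = k
          · rw [if_pos hpk]
            intro hc
            rcases (PySem.Set.mem_add seen e p.2).mp hc with h1 | h2
            · exact hpd (by rwa [hpk])
            · exact (List.nodup_cons.mp hnd).1 (by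
                have : p = (k, e) := Prod.ext hpk h2
                rwa [this] at hp)
          · rw [if_neg hpk]; exact hpd

theorem mem_pyRange_three {n x : Int} (hd : (3 : Int) ∣ n) :
    x ∈ PySem.List.pyRange 0 n 3 ↔ 0 ≤ x ∧ x < n ∧ (3 : Int) ∣ x := by
  rw [PySem.List.pyRange_of_pos 0 n (by norm_num)]
  simp only [List.mem_map, List.mem_range]
  constructor
  · rintro ⟨k, hk, rfl⟩
    split_ifs at hk with h
    · omega
    · omega
  · rintro ⟨h0, h1, h2⟩
    refine ⟨(x / 3).toNat, ?_, ?_⟩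
    · split_ifs with h
      · omega
      · omega
    · omega

theorem nodup_pyRange_three {n : Int} : (PySem.List.pyRange 0 n 3).Nodup := by
  rw [PySem.List.pyRange_of_pos 0 n (by norm_num)]
  exact (List.nodup_map_iff (f := fun k : ℕ => (0 : Int) + 3 * k)
    (by intro a b hab; simpa using hab)).mpr List.nodup_range

-- flatMap over parts with pairwise different key values is Nodup iff every part is
theorem nodup_flatMap_key {α β κ : Type} (l : List α) (f : α → List β) (key : β → κ) (kf : α → κ)
    (hl : l.Nodup) (hkey : ∀ a ∈ l, ∀ b ∈ f a, key b = kf a)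
    (hinj : ∀ a ∈ l, ∀ a' ∈ l, kf a = kf a' → a = a') :
    (l.flatMap f).Nodup ↔ ∀ a ∈ l, (f a).Nodup := by
  rw [List.nodup_flatMap]
  refine and_iff_left ?_
  rw [List.pairwise_iff_forall_sublist]
  intro a a' hsub
  have hne : a ≠ a' := List.pairwise_iff_forall_sublist.mp hl hsub
  have ha : a ∈ l := hsub.subset (by simp)
  have ha' : a' ∈ l := hsub.subset (by simp)
  intro x hx hx'
  exact hne (hinj a ha a' ha' (by rw [← hkey a ha x hx, ← hkey a' ha' x hx']))

theorem mem_bCells {n : Int} {p : Int × Int} :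
    p ∈ bCells n ↔ 0 ≤ p.1 ∧ p.1 < n ∧ 0 ≤ p.2 ∧ p.2 < n := by
  cases p with
  | mk r c =>
    simp only [bCells, List.mem_flatMap, List.mem_map, PySem.List.mem_pyRange_one, Prod.mk.injEq]
    constructor
    · rintro ⟨a, ha, b, hb, rfl, rfl⟩; exact ⟨ha.1, ha.2, hb.1, hb.2⟩
    · rintro ⟨h1, h2, h3, h4⟩; exact ⟨r, ⟨h1, h2⟩, c, ⟨h3, h4⟩, rfl, rfl⟩

theorem mem_bxCells {n : Int} (hd : (3 : Int) ∣ n) {p : Int × Int} :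
    p ∈ bxCells n ↔ 0 ≤ p.1 ∧ p.1 < n ∧ 0 ≤ p.2 ∧ p.2 < n := by
  cases p with
  | mk r c =>
    simp only [bxCells, List.mem_flatMap, List.mem_map, PySem.List.mem_pyRange_one,
      mem_pyRange_three hd, Prod.mk.injEq]
    constructor
    · rintro ⟨row, hrow, col, hcol, i, hi, j, hj, rfl, rfl⟩
      refine ⟨by omega, ?_, by omega, ?_⟩
      · rcases hrow.2.2 with ⟨q, rfl⟩; rcases hd with ⟨m, rfl⟩; omega
      · rcases hcol.2.2 with ⟨q, rfl⟩; rcases hd with ⟨m, rfl⟩; omega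
    · rintro ⟨h1, h2, h3, h4⟩
      refine ⟨r - r % 3, ⟨by omega, by omega, by omega⟩,
              c - c % 3, ⟨by omega, by omega, by omega⟩,
              r % 3, ⟨by omega, by omega⟩, c % 3, ⟨by omega, by omega⟩, by omega, by omega⟩

theorem nodup_bCells {n : Int} : (bCells n).Nodup := by
  rw [bCells, nodup_flatMap_key _ _ (fun p => p.1) (fun r => r)
    (PySem.List.nodup_pyRange_one 0 n)
    (by rintro a - b hb; simp only [List.mem_map] at hb; rcases hb with ⟨c, -, rfl⟩; rfl)
    (by intro a _ a' _ h; exact h)]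
  intro r _
  exact (List.nodup_map_iff (by intro a b hab; simpa using hab)).mpr
    (PySem.List.nodup_pyRange_one 0 n)

theorem nodup_boxCells {row col : Int} :
    ((PySem.List.pyRange 0 3 1).flatMap (fun i =>
      (PySem.List.pyRange 0 3 1).map (fun j => (row + i, col + j)))).Nodup := by
  rw [nodup_flatMap_key _ _ (fun p : Int × Int => p.1) (fun i => row + i)
    (PySem.List.nodup_pyRange_one 0 3)
    (by rintro i - p hp; simp only [List.mem_map] at hp; rcases hp with ⟨j, -, rfl⟩; rfl)
    (by intro a _ a' _ h; exact add_left_cancel h)]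
  intro i _
  exact (List.nodup_map_iff (by intro a b hab; simpa using hab)).mpr
    (PySem.List.nodup_pyRange_one 0 3)

theorem nodup_bxCells {n : Int} : (bxCells n).Nodup := by
  rw [bxCells, nodup_flatMap_key _ _ (fun p : Int × Int => p.1 - p.1 % 3) (fun row => row)
    nodup_pyRange_three
    (by
      rintro row hrow p hp
      simp only [List.mem_flatMap, List.mem_map, PySem.List.mem_pyRange_one] at hp
      rcases hp with ⟨col, -, i, hi, j, -, rfl⟩
      have h3 := (PySem.List.mem_pyRange_iff_of_pos (by norm_num : (0:Int) < 3) row).mp hrow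
      dsimp only
      omega)
    (by intro a _ a' _ h; exact h)]
  intro row _
  rw [nodup_flatMap_key _ _ (fun p : Int × Int => p.2 - p.2 % 3) (fun col => col)
    nodup_pyRange_three
    (by
      rintro col hcol p hp
      simp only [List.mem_flatMap, List.mem_map, PySem.List.mem_pyRange_one] at hp
      rcases hp with ⟨i, -, j, hj, rfl⟩
      have h3 := (PySem.List.mem_pyRange_iff_of_pos (by norm_num : (0:Int) < 3) col).mp hcol
      dsimp only
      omega)
    (by intro a _ a' _ h; exact h)]
  intro col _
  exact nodup_boxCells

theorem perm_cells {n : Int} (hd : (3 : Int) ∣ n) : (bCells n).Perm (bxCells n) := by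
  rw [List.perm_ext_iff_of_nodup nodup_bCells nodup_bxCells]
  intro p
  rw [mem_bCells, mem_bxCells hd]

theorem fd3_add {row i : Int} (h3 : (3 : Int) ∣ row) (h0 : 0 ≤ i) (h1 : i < 3) :
    PySem.Int.floordiv (row + i) 3 = PySem.Int.floordiv row 3 := by
  rw [PySem.Int.floordiv_eq_ediv_of_pos (by norm_num),
    PySem.Int.floordiv_eq_ediv_of_pos (by norm_num)]
  omega

theorem fd3_inj {a b : Int} (ha : (3 : Int) ∣ a) (hb : (3 : Int) ∣ b)
    (h : PySem.Int.floordiv a 3 = PySem.Int.floordiv b 3) : a = b := by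
  rw [PySem.Int.floordiv_eq_ediv_of_pos (by norm_num),
    PySem.Int.floordiv_eq_ediv_of_pos (by norm_num)] at h
  omega

-- a filterMap of 'skip dots, tag with a constant key' is a map over the filtered values
theorem fm_eq (K : Int × Int) (f : Int → String) (l : List Int) :
    l.filterMap (fun j => if f j = "." then none else some (K, f j)) =
      ((l.map f).filter (fun e => e ≠ ".")).map (fun v => (K, v)) := by
  induction l with
  | nil => rfl
  | cons j l ih =>
    by_cases h : f j = "."
    · rw [List.filterMap_cons_none (by simp [h])]
      simp [h, ih]
    · rw [List.filterMap_cons_some (by simp [h] : _ = some (K, f j))]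
      simp [h, ih]

theorem boxPart_eq (board : List (List String)) {row col : Int}
    (hrow : (3 : Int) ∣ row) (hcol : (3 : Int) ∣ col) :
    ((PySem.List.pyRange 0 3 1).flatMap (fun i =>
        (PySem.List.pyRange 0 3 1).map (fun j => (row + i, col + j)))).filterMap (tagF board) =
      (boxVals board row col).map
        (fun v => ((PySem.Int.floordiv row 3, PySem.Int.floordiv col 3), v)) := by
  rw [List.filterMap_flatMap]
  rw [boxVals, ndM, List.filter_flatMap, List.map_flatMap]
  apply List.flatMap_congr ?_
  intro i hi
  rw [List.filterMap_map]
  have hi' : 0 ≤ i ∧ i < 3 := PySem.List.mem_pyRange_one.mp hi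
  have hcong : ∀ j ∈ PySem.List.pyRange 0 3 1,
      (tagF board ∘ fun j => (row + i, col + j)) j =
        (fun j => if pvCell board (row + i) (col + j) = "." then none
          else some ((PySem.Int.floordiv row 3, PySem.Int.floordiv col 3),
            pvCell board (row + i) (col + j))) j := by
    intro j hj
    have hj' : 0 ≤ j ∧ j < 3 := PySem.List.mem_pyRange_one.mp hj
    simp only [Function.comp, tagF]
    rw [fd3_add hrow hi'.1 hi'.2, fd3_add hcol hj'.1 hj'.2]
  rw [List.filterMap_congr hcong]
  rw [fm_eq]

theorem bx_nodup_iff (board : List (List String)) {n : Int} (hd : (3 : Int) ∣ n) :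
    ((bxCells n).filterMap (tagF board)).Nodup ↔
      ∀ row ∈ PySem.List.pyRange 0 n 3, ∀ col ∈ PySem.List.pyRange 0 n 3,
        (boxVals board row col).Nodup := by
  rw [bxCells, List.filterMap_flatMap]
  have hrw : ∀ row ∈ PySem.List.pyRange 0 n 3,
      ((PySem.List.pyRange 0 n 3).flatMap (fun col =>
          (PySem.List.pyRange 0 3 1).flatMap (fun i =>
            (PySem.List.pyRange 0 3 1).map (fun j => (row + i, col + j))))).filterMap (tagF board) =
        (PySem.List.pyRange 0 n 3).flatMap (fun col =>
          (boxVals board row col).map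
            (fun v => ((PySem.Int.floordiv row 3, PySem.Int.floordiv col 3), v))) := by
    intro row hrow
    rw [List.filterMap_flatMap]
    apply List.flatMap_congr
    intro col hcol
    exact boxPart_eq board ((mem_pyRange_three hd).mp hrow).2.2 ((mem_pyRange_three hd).mp hcol).2.2
  rw [List.flatMap_congr hrw]
  rw [nodup_flatMap_key _ _ (fun p : (Int × Int) × String => p.1.1)
    (fun row => PySem.Int.floordiv row 3) nodup_pyRange_three
    (by
      rintro row hrow p hp
      simp only [List.mem_flatMap, List.mem_map] at hp
      rcases hp with ⟨col, -, v, -, rfl⟩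
      rfl)
    (by
      intro a ha a' ha' h
      exact fd3_inj ((mem_pyRange_three hd).mp ha).2.2 ((mem_pyRange_three hd).mp ha').2.2 h)]
  apply forall₂_congr
  intro row hrow
  rw [nodup_flatMap_key _ _ (fun p : (Int × Int) × String => p.1.2)
    (fun col => PySem.Int.floordiv col 3) nodup_pyRange_three
    (by
      rintro col hcol p hp
      simp only [List.mem_map] at hp
      rcases hp with ⟨v, -, rfl⟩
      rfl)
    (by
      intro a ha a' ha' h
      exact fd3_inj ((mem_pyRange_three hd).mp ha).2.2 ((mem_pyRange_three hd).mp ha').2.2 h)]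
  apply forall₂_congr
  intro col hcol
  exact List.nodup_map_iff (by intro a b hab; simpa using hab)

-- duplicate ⇒ not Nodup, via counts
theorem not_nodup_of_count2 {α : Type} [BEq α] [LawfulBEq α] {l : List α} {v : α}
    (h : 2 ≤ l.count v) : ¬ l.Nodup :=
  fun hn => absurd (List.nodup_iff_count_le_one.mp hn v) (by omega)

theorem flat00_eq (board : List (List String)) :
    (PySem.List.pyRange 0 3 1).flatMap
        (fun i => (PySem.List.pyRange 0 3 1).map (fun j => pvCell board (0 + i) (0 + j))) =
      [pvCell board 0 0, pvCell board 0 1, pvCell board 0 2] ++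
        [pvCell board 1 0, pvCell board 1 1, pvCell board 1 2,
         pvCell board 2 0, pvCell board 2 1, pvCell board 2 2] := by
  have h3 : PySem.List.pyRange 0 3 1 = [0, 1, 2] := by decide
  simp [h3]

theorem boxVals00_not_nodup (board : List (List String))
    (h : (pvCell board 0 0 = pvCell board 0 1 ∧ pvCell board 0 0 ≠ ".") ∨
         (pvCell board 0 0 = pvCell board 0 2 ∧ pvCell board 0 0 ≠ ".") ∨
         (pvCell board 0 1 = pvCell board 0 2 ∧ pvCell board 0 1 ≠ ".")) :
    ¬ (boxVals board 0 0).Nodup := by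
  obtain ⟨heq, hne⟩ | ⟨heq, hne⟩ | ⟨heq, hne⟩ := h
  · apply not_nodup_of_count2 (v := pvCell board 0 0)
    rw [boxVals, ndM, List.count_filter (by simpa using hne), flat00_eq, List.count_append]
    have : 2 ≤ List.count (pvCell board 0 0)
        [pvCell board 0 0, pvCell board 0 1, pvCell board 0 2] := by
      simp only [List.count_cons, List.count_nil, ← heq, beq_self_eq_true, if_true]
      split_ifs <;> omega
    omega
  · apply not_nodup_of_count2 (v := pvCell board 0 0)
    rw [boxVals, ndM, List.count_filter (by simpa using hne), flat00_eq, List.count_append]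
    have : 2 ≤ List.count (pvCell board 0 0)
        [pvCell board 0 0, pvCell board 0 1, pvCell board 0 2] := by
      simp only [List.count_cons, List.count_nil, ← heq, beq_self_eq_true, if_true]
      split_ifs <;> omega
    omega
  · apply not_nodup_of_count2 (v := pvCell board 0 1)
    rw [boxVals, ndM, List.count_filter (by simpa using hne), flat00_eq, List.count_append]
    have : 2 ≤ List.count (pvCell board 0 1)
        [pvCell board 0 0, pvCell board 0 1, pvCell board 0 2] := by
      simp only [List.count_cons, List.count_nil, ← heq, beq_self_eq_true, if_true]
      split_ifs <;> omega
    omega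

theorem a_false_of_box00 (board : List (List String)) (hn : (0 : Int) < (board.length : Int))
    (hbox : ¬ (boxVals board 0 0).Nodup) : isValidSqr board = false := by
  rw [isValidSqr, aRows_spec]
  apply List.all_eq_false.mpr
  have h0 : (0 : Int) ∈ PySem.List.pyRange 0 (board.length : Int) 3 :=
    (PySem.List.mem_pyRange_iff_of_pos (by norm_num) 0).mpr ⟨le_refl 0, hn, by norm_num⟩
  refine ⟨0, h0, ?_⟩
  intro hall
  rw [List.all_eq_true] at hall
  exact hbox (by simpa using hall 0 h0)

theorem bPrefix_not_nodup (board : List (List String)) {m : Int} (hm : 3 ≤ m)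
    (h : (pvCell board 0 0 = pvCell board 0 1 ∧ pvCell board 0 0 ≠ ".") ∨
         (pvCell board 0 0 = pvCell board 0 2 ∧ pvCell board 0 0 ≠ ".") ∨
         (pvCell board 0 1 = pvCell board 0 2 ∧ pvCell board 0 1 ≠ ".")) :
    ¬ ((bCells m).filterMap (tagF board)).Nodup := by
  have hsplit : bCells m =
      (PySem.List.pyRange 0 m 1).map (fun c => ((0 : Int), c)) ++
        (PySem.List.pyRange 1 m 1).flatMap
          (fun r => (PySem.List.pyRange 0 m 1).map (fun c => (r, c))) := by
    rw [bCells, PySem.List.pyRange_one_cons (by omega : (0 : Int) < m), List.flatMap_cons]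
    norm_num
  have h012 : PySem.List.pyRange 0 m 1 = [0, 1, 2] ++ PySem.List.pyRange 3 m 1 := by
    rw [PySem.List.pyRange_one_append 0 3 m (by norm_num) hm]
    congr 1
  have hL : (bCells m).filterMap (tagF board) =
      ([(0, 0), (0, 1), (0, 2)] : List (Int × Int)).filterMap (tagF board) ++
        ((PySem.List.pyRange 3 m 1).map (fun c => ((0 : Int), c)) ++
          (PySem.List.pyRange 1 m 1).flatMap
            (fun r => (PySem.List.pyRange 0 m 1).map (fun c => (r, c)))).filterMap (tagF board) := by
    rw [hsplit, List.filterMap_append, h012, List.map_append, List.filterMap_append,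
      List.append_assoc, ← List.filterMap_append]
    rfl
  rw [hL]
  have key0 : PySem.Int.floordiv (0 : Int) 3 = 0 := by decide
  have key1 : PySem.Int.floordiv (1 : Int) 3 = 0 := by decide
  have key2 : PySem.Int.floordiv (2 : Int) 3 = 0 := by decide
  obtain ⟨heq, hne⟩ | ⟨heq, hne⟩ | ⟨heq, hne⟩ := h
  · apply not_nodup_of_count2 (v := (((0 : Int), (0 : Int)), pvCell board 0 0))
    rw [List.count_append]
    have : 2 ≤ List.count (((0 : Int), (0 : Int)), pvCell board 0 0)
        (([(0, 0), (0, 1), (0, 2)] : List (Int × Int)).filterMap (tagF board)) := by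
      simp only [List.filterMap_cons, List.filterMap_nil, tagF, key0, key1, key2, ← heq,
        if_neg hne]
      by_cases h2 : pvCell board 0 2 = "." <;> simp [h2]
    omega
  · apply not_nodup_of_count2 (v := (((0 : Int), (0 : Int)), pvCell board 0 0))
    rw [List.count_append]
    have : 2 ≤ List.count (((0 : Int), (0 : Int)), pvCell board 0 0)
        (([(0, 0), (0, 1), (0, 2)] : List (Int × Int)).filterMap (tagF board)) := by
      simp only [List.filterMap_cons, List.filterMap_nil, tagF, key0, key1, key2, ← heq,
        if_neg hne]
      by_cases h1 : pvCell board 0 1 = "." <;> simp [h1, List.count_cons]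
    omega
  · apply not_nodup_of_count2 (v := (((0 : Int), (0 : Int)), pvCell board 0 1))
    rw [List.count_append]
    have : 2 ≤ List.count (((0 : Int), (0 : Int)), pvCell board 0 1)
        (([(0, 0), (0, 1), (0, 2)] : List (Int × Int)).filterMap (tagF board)) := by
      simp only [List.filterMap_cons, List.filterMap_nil, tagF, key0, key1, key2, ← heq,
        if_neg hne]
      by_cases h0 : pvCell board 0 0 = "." <;> simp [h0, List.count_cons]
    omega

theorem bPrefix2_not_nodup (board : List (List String)) {m : Int} (hm : 2 ≤ m)
    (heq : pvCell board 0 0 = pvCell board 0 1) (hne : pvCell board 0 0 ≠ ".") :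
    ¬ ((bCells m).filterMap (tagF board)).Nodup := by
  have hsplit : bCells m =
      (PySem.List.pyRange 0 m 1).map (fun c => ((0 : Int), c)) ++
        (PySem.List.pyRange 1 m 1).flatMap
          (fun r => (PySem.List.pyRange 0 m 1).map (fun c => (r, c))) := by
    rw [bCells, PySem.List.pyRange_one_cons (by omega : (0 : Int) < m), List.flatMap_cons]
    norm_num
  have h01 : PySem.List.pyRange 0 m 1 = [0, 1] ++ PySem.List.pyRange 2 m 1 := by
    rw [PySem.List.pyRange_one_append 0 2 m (by norm_num) hm]
    congr 1
  have hL : (bCells m).filterMap (tagF board) =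
      ([(0, 0), (0, 1)] : List (Int × Int)).filterMap (tagF board) ++
        ((PySem.List.pyRange 2 m 1).map (fun c => ((0 : Int), c)) ++
          (PySem.List.pyRange 1 m 1).flatMap
            (fun r => (PySem.List.pyRange 0 m 1).map (fun c => (r, c)))).filterMap (tagF board) := by
    rw [hsplit, List.filterMap_append, h01, List.map_append, List.filterMap_append,
      List.append_assoc, ← List.filterMap_append]
    rfl
  rw [hL]
  have key0 : PySem.Int.floordiv (0 : Int) 3 = 0 := by decide
  have key1 : PySem.Int.floordiv (1 : Int) 3 = 0 := by decide
  apply not_nodup_of_count2 (v := (((0 : Int), (0 : Int)), pvCell board 0 0))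
  rw [List.count_append]
  have : 2 ≤ List.count (((0 : Int), (0 : Int)), pvCell board 0 0)
      (([(0, 0), (0, 1)] : List (Int × Int)).filterMap (tagF board)) := by
    simp only [List.filterMap_cons, List.filterMap_nil, tagF, key0, key1, ← heq, if_neg hne]
    simp
  omega

-- a run of cells all lying in box (0,0): their tagged stream is the filtered values keyed (0,0)
theorem fm_cells (board : List (List String)) (cells : List (Int × Int))
    (h : ∀ rc ∈ cells, (PySem.Int.floordiv rc.1 3, PySem.Int.floordiv rc.2 3) = ((0 : Int), (0 : Int))) :
    cells.filterMap (tagF board) =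
      ((cells.map (fun rc => pvCell board rc.1 rc.2)).filter (fun e => e ≠ ".")).map
        (fun v => (((0 : Int), (0 : Int)), v)) := by
  induction cells with
  | nil => rfl
  | cons rc rest ih =>
    have hk := h rc List.mem_cons_self
    have ih' := ih (fun x hx => h x (List.mem_cons_of_mem _ hx))
    by_cases hc : pvCell board rc.1 rc.2 = "."
    · rw [List.filterMap_cons_none (by simp [tagF, hc])]
      simp [hc, ih']
    · rw [List.filterMap_cons_some (show tagF board rc = some (((0 : Int), (0 : Int)), pvCell board rc.1 rc.2) by
        simp only [tagF, if_neg hc]; rw [hk])]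
      simp [hc, ih']

theorem bBox_not_nodup (board : List (List String)) {m : Int} (hm : 3 ≤ m)
    (hbox : ¬ (([pvCell board 0 0, pvCell board 0 1, pvCell board 0 2,
         pvCell board 1 0, pvCell board 1 1, pvCell board 1 2,
         pvCell board 2 0, pvCell board 2 1, pvCell board 2 2].filter
           (fun e => e ≠ ".")).Nodup)) :
    ¬ ((bCells m).filterMap (tagF board)).Nodup := by
  have h012 : PySem.List.pyRange 0 m 1 = [0, 1, 2] ++ PySem.List.pyRange 3 m 1 := by
    rw [PySem.List.pyRange_one_append 0 3 m (by norm_num) hm]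
    congr 1
  have hrow : ∀ r : Int, List.Sublist [(r, (0 : Int)), (r, 1), (r, 2)]
      ((([0, 1, 2] : List Int) ++ PySem.List.pyRange 3 m 1).map (fun c => (r, c))) := by
    intro r
    rw [List.map_append]
    exact List.sublist_append_left _ _
  have hnine : List.Sublist
      (([(0, 0), (0, 1), (0, 2), (1, 0), (1, 1), (1, 2), (2, 0), (2, 1), (2, 2)] :
        List (Int × Int))) (bCells m) := by
    rw [bCells, h012, List.flatMap_append]
    refine List.Sublist.trans ?_ (List.sublist_append_left _ _)
    simp only [List.flatMap_cons, List.flatMap_nil, List.append_nil]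
    exact List.Sublist.append (hrow 0) (List.Sublist.append (hrow 1) (hrow 2))
  intro hnd
  have h9 := ((hnine.filterMap (tagF board)).nodup hnd)
  rw [fm_cells board _ (by decide)] at h9
  exact hbox ((List.nodup_map_iff (by intro a b hab; simpa using hab)).mp h9)

theorem alt_eq_false (board : List (List String))
    (h : ¬ ((bCells (board.length : Int)).filterMap (tagF board)).Nodup) :
    isValidSqr_alt board = false := by
  cases halt : isValidSqr_alt board with
  | false => rfl
  | true =>
    exact absurd ((bGo_spec board _ PySem.Dict.empty).mp halt).1 h

-- ===== VERDICT (by name: the statement is the Claim_ definition above) =====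
theorem isValidSqr_spec : Claim_equal_isValidSqr := by
  intro board _ hpre
  unfold Spec_isValidSqr
  rcases hpre with ⟨hd, -⟩ | ⟨hlen, -, heq, hne⟩ | ⟨hlen, -, hdup⟩ | ⟨hlen, -, -, -, hbox⟩
  · -- the square 3-aligned domain: both sides decide 'every box duplicate-free'
    rw [isValidSqr, isValidSqr_alt]
    apply Bool.eq_iff_iff.mpr
    rw [aRows_spec]
    rw [bGo_spec]
    have hBside : ((bCells (board.length : Int)).filterMap (tagF board)).Nodup ↔
        ∀ row ∈ PySem.List.pyRange 0 (board.length : Int) 3,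
          ∀ col ∈ PySem.List.pyRange 0 (board.length : Int) 3, (boxVals board row col).Nodup := by
      rw [((perm_cells hd).filterMap (tagF board)).nodup_iff]
      exact bx_nodup_iff board hd
    simp only [List.all_eq_true, decide_eq_true_eq]
    rw [hBside]
    refine ⟨fun h => ⟨h, ?_⟩, fun h => h.1⟩
    intro p _
    rw [PySem.Dict.getD_empty]
    exact List.not_mem_nil
  · -- an immediate duplicate in the first two cells of row 0: both scans stop there with False
    have hn : (0 : Int) < (board.length : Int) := by exact_mod_cast Nat.lt_of_lt_of_le (by norm_num) hlen
    have hm : 2 ≤ (board.length : Int) := by exact_mod_cast hlen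
    rw [a_false_of_box00 board hn (boxVals00_not_nodup board (Or.inl ⟨heq, hne⟩)),
      alt_eq_false board (bPrefix2_not_nodup board hm heq hne)]
  · -- an immediate duplicate among the first three cells of row 0: both scans stop there with False
    have hn : (0 : Int) < (board.length : Int) := by exact_mod_cast Nat.lt_of_lt_of_le (by norm_num) hlen
    have hm : 3 ≤ (board.length : Int) := by exact_mod_cast hlen
    rw [a_false_of_box00 board hn (boxVals00_not_nodup board (Or.inr hdup)),
      alt_eq_false board (bPrefix_not_nodup board hm (Or.inr hdup))]
  · -- a duplicate anywhere in the top-left 3×3 box, with rows long enough for both scans to reach it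
    have hn : (0 : Int) < (board.length : Int) := by exact_mod_cast Nat.lt_of_lt_of_le (by norm_num) hlen
    have hm : 3 ≤ (board.length : Int) := by exact_mod_cast hlen
    have hA : ¬ (boxVals board 0 0).Nodup := by
      rw [boxVals, ndM, flat00_eq]
      simpa using hbox
    rw [a_false_of_box00 board hn hA, alt_eq_false board (bBox_not_nodup board hm hbox)]
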